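-- pv_equiv track=rewrite | github.com/Ashiq-am/Path-of-Python | 3.Data Types/Arrays Set 1 and Set 2/Prefix Sum/Inclusion Exclusion principle and programming applications/Problem 2.py | count
-- ===== SOURCE A (Python) =====
-- def bitsoncount(x):
-- 	return bin(x).count('1')
--
-- def count(a, m, n):
--
-- 	odd = 0
-- 	even = 0
-- 	p = 1
-- 	pow_set_size = 1 << n
--
-- 	# Run from counter 000..0 to 111..1
-- 	for counter in range(1, pow_set_size):
--
-- 		p = 1
-- 		for j in range(n):
--
-- 			# Check if jth bit in the
-- 			# counter is set If set
-- 			# then pront jth element from set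
-- 			if (counter & (1 << j)):
--
-- 				p *= a[j]
--
-- 		# if set bits is odd, then add to
-- 		# the number of multiples
-- 		if (bitsoncount(counter) & 1):
-- 			odd += (m // p)
-- 		else:
--
-- 			even += (m // p)
--
-- 	return odd - even
-- ===== SOURCE B (Python) =====
-- def count(a, m, n):
--     # Inclusion-exclusion by recursion on the divisors instead of bitmask
--     # enumeration: h(i, q) = sum over subsets S of a[i:n] of
--     # (-1)**len(S) * (m // (q * prod(S))); the answer is m - h(0, 1).
--     def h(i, q):
--         if i == n:
--             return m // q
--         return h(i + 1, q) - h(i + 1, q * a[i])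
--     return m - h(0, 1)
-- ===== Notes on version B (the rewrite author's own statement) =====
-- stated objective: alternative
-- what changed: Replaces the bitmask enumeration of all 2^n subsets (with an O(n) inner product loop and a popcount per subset) by a sign-carrying branching recursion over the divisor list that extends each partial product by one factor per call.
import Mathlib
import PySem

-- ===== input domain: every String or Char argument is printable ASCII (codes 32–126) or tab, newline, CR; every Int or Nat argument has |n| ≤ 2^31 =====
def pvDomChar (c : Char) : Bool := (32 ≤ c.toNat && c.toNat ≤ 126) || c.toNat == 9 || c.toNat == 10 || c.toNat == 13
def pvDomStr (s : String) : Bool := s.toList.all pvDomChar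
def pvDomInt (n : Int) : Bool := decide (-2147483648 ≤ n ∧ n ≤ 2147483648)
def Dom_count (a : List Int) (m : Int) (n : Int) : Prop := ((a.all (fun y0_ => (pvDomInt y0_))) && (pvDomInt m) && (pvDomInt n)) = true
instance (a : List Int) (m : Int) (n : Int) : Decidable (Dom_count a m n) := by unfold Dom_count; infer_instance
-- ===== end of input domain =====

-- B replaces the bitmask subset enumeration (inner product loop + popcount per
-- subset) by a sign-carrying recursion over the divisor list that extends each
-- partial product by one factor per call (objective: alternative).


-- ===== PORT A =====
-- bin(x).count('1') = PySem.Int.bitCount (Python-exact, also on negatives)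
def bitsoncount (x : Int) : Int := (PySem.Int.bitCount x : Int)

def count (a : List Int) (m : Int) (n : Int) : Int :=
  let N := n.toNat                    -- n ≥ 0 by Pre_ (1 << n raises for n < 0)
  let powSetSize := 2 ^ N             -- pow_set_size = 1 << n
  -- counter runs over range(1, pow_set_size); state (odd, even)
  let st := (List.range (powSetSize - 1)).foldl (fun (st : Int × Int) k =>
    let counter := k + 1
    -- p = 1; for j in range(n): if counter & (1 << j): p *= a[j]
    let p := (List.range N).foldl (fun p j =>
      if counter &&& (1 <<< j) ≠ 0 then p * a.getD j 0 else p) (1 : Int)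
    -- if bitsoncount(counter) & 1: odd += m // p  else: even += m // p
    if PySem.Int.band (bitsoncount (counter : Int)) 1 ≠ 0 then
      (st.1 + PySem.Int.floordiv m p, st.2)
    else
      (st.1, st.2 + PySem.Int.floordiv m p)) ((0 : Int), (0 : Int))
  st.1 - st.2

-- ===== PORT B =====
-- h(i, q): sum over subsets S of a[i:n] of (-1)^|S| * (m // (q * prod S));
-- Python's 'if i == n' is reached only with i ≤ n, so '≤' totalizes it
-- (0 ≤ n and n ≤ len(a) by Pre_; a[i] → getD, exact for i < len(a)).
def hB (a : List Int) (m : Int) (N : Nat) (i : Nat) (q : Int) : Int :=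
  if N ≤ i then PySem.Int.floordiv m q
  else hB a m N (i + 1) q - hB a m N (i + 1) (q * a.getD i 0)
  termination_by N - i
  decreasing_by all_goals omega

def count_alt (a : List Int) (m : Int) (n : Int) : Int :=
  m - hB a m n.toNat 0 1

-- ===== PRECONDITION & SPEC =====
-- Pre_ is exactly A's return domain: A raises for n < 0 (negative shift),
-- for n > len(a) (IndexError) and when some a[j] = 0 with j < n (ZeroDivisionError).
def Pre_count (a : List Int) (m : Int) (n : Int) : Prop :=
  0 ≤ n ∧ n.toNat ≤ a.length ∧ ∀ x ∈ a.take n.toNat, x ≠ 0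
instance (a : List Int) (m : Int) (n : Int) : Decidable (Pre_count a m n) := by unfold Pre_count; infer_instance
def pvWitness_count : List Int × Int × Int := ([2, 3, 5], 100, 3)

def Spec_count (a : List Int) (m : Int) (n : Int) (out : Int) : Prop := out = count_alt a m n
instance (a : List Int) (m : Int) (n : Int) (out : Int) : Decidable (Spec_count a m n out) := by unfold Spec_count; infer_instance

-- ===== CLAIM (what is proved, stated in full; the proofs are below) =====
def Claim_equal_count : Prop := ∀ (a : List Int) (m : Int) (n : Int), Dom_count a m n → Pre_count a m n → Spec_count a m n (count a m n)

-- ===== LEMMAS AND PROOFS =====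

-- popcount of a Nat, as A's bitsoncount sees it
def pc (c : Nat) : Nat := PySem.Int.bitCount (c : Int)

-- the inner-loop product of A
def P (a : List Int) (N c : Nat) : Int :=
  (List.range N).foldl (fun p j => if c &&& (1 <<< j) ≠ 0 then p * a.getD j 0 else p) 1

-- abstract signed sum both programs compute
def SA (a : List Int) (m : Int) (N : Nat) (q : Int) : Int :=
  ∑ c ∈ Finset.range (2 ^ N), (-1 : Int) ^ (pc c) * PySem.Int.floordiv m (q * P a N c)

-- pc of 0
theorem pc_zero : pc 0 = 0 := by decide

-- adding a new top bit increments the popcount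
theorem pc_add_pow (N : Nat) : ∀ c : Nat, c < 2 ^ N → pc (2 ^ N + c) = pc c + 1 := by
  induction N with
  | zero => intro c hc; interval_cases c; decide
  | succ N ih =>
    intro c hc
    have h1 : 0 < 2 ^ (N + 1) + c := by positivity
    have h2 : (2 ^ (N + 1) + c) % 2 = c % 2 := by omega
    have h3 : (2 ^ (N + 1) + c) / 2 = 2 ^ N + c / 2 := by omega
    have h4 : c / 2 < 2 ^ N := by omega
    have hL : pc (2 ^ (N + 1) + c) = c % 2 + pc (2 ^ N + c / 2) := by
      unfold pc
      rw [PySem.Int.bitCount_natCast h1, h2, h3]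
    rw [hL, ih _ h4]
    rcases Nat.eq_zero_or_pos c with h | h
    · subst h; simp [pc_zero]
    · have : pc c = c % 2 + pc (c / 2) := by
        unfold pc; rw [PySem.Int.bitCount_natCast h]
      omega

-- P one step
theorem P_succ (a : List Int) (N c : Nat) :
    P a (N + 1) c = if c &&& (1 <<< N) ≠ 0 then P a N c * a.getD N 0 else P a N c := by
  simp [P, List.range_succ]

-- bit test via testBit
theorem band_pow_ne (c j : Nat) : (c &&& (1 <<< j) ≠ 0) ↔ c.testBit j = true := by
  rw [Nat.one_shiftLeft, Nat.and_two_pow]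
  rcases c.testBit j <;> simp

theorem P_congr (a : List Int) (N : Nat) : ∀ c d : Nat,
    (∀ j < N, c.testBit j = d.testBit j) → P a N c = P a N d := by
  induction N with
  | zero => intro c d _; rfl
  | succ N ih =>
    intro c d h
    have heq : c &&& (1 <<< N) = d &&& (1 <<< N) := by
      rw [Nat.one_shiftLeft, Nat.and_two_pow, Nat.and_two_pow, h N (by omega)]
    rw [P_succ, P_succ, ih c d (fun j hj => h j (by omega)), heq]

-- counter 0 yields product 1
theorem P_zero_counter (a : List Int) (N : Nat) : P a N 0 = 1 := by
  induction N with
  | zero => rfl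
  | succ N ih => rw [P_succ, ih]; simp

theorem P_succ_low (a : List Int) (N c : Nat) (hc : c < 2 ^ N) : P a (N + 1) c = P a N c := by
  rw [P_succ]
  have : ¬ c &&& (1 <<< N) ≠ 0 := by
    rw [not_not, Nat.one_shiftLeft, Nat.and_two_pow, Nat.testBit_lt_two_pow hc]; simp
  simp [this]

theorem testBit_high (N c : Nat) (hc : c < 2 ^ N) : (2 ^ N + c).testBit N = true := by
  rw [Nat.testBit_two_pow_add_eq, Nat.testBit_lt_two_pow hc]
  rfl

theorem P_succ_high (a : List Int) (N c : Nat) (hc : c < 2 ^ N) :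
    P a (N + 1) (2 ^ N + c) = P a N c * a.getD N 0 := by
  rw [P_succ]
  have hbits : ∀ j < N, (2 ^ N + c).testBit j = c.testBit j :=
    fun j hj => Nat.testBit_two_pow_add_gt hj c
  have htop : (2 ^ N + c) &&& (1 <<< N) ≠ 0 := by
    rw [band_pow_ne]; exact testBit_high N c hc
  rw [if_pos htop, P_congr a N _ c hbits]

theorem sum_range_add_split (f : Nat → Int) (A B : Nat) :
    ∑ i ∈ Finset.range (A + B), f i
      = ∑ i ∈ Finset.range A, f i + ∑ i ∈ Finset.range B, f (A + i) := by
  induction B with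
  | zero => simp
  | succ B ih =>
    rw [show A + (B + 1) = (A + B) + 1 by omega, Finset.sum_range_succ,
      Finset.sum_range_succ, ih]
    ring

theorem SA_succ (a : List Int) (m : Int) (N : Nat) (q : Int) :
    SA a m (N + 1) q = SA a m N q - SA a m N (q * a.getD N 0) := by
  unfold SA
  rw [show (2 : Nat) ^ (N + 1) = 2 ^ N + 2 ^ N by ring, sum_range_add_split]
  have h1 : ∀ c ∈ Finset.range (2 ^ N),
      (-1 : Int) ^ (pc c) * PySem.Int.floordiv m (q * P a (N + 1) c)
        = (-1 : Int) ^ (pc c) * PySem.Int.floordiv m (q * P a N c) := by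
    intro c hc
    rw [P_succ_low a N c (Finset.mem_range.mp hc)]
  have h2 : ∀ c ∈ Finset.range (2 ^ N),
      (-1 : Int) ^ (pc (2 ^ N + c)) * PySem.Int.floordiv m (q * P a (N + 1) (2 ^ N + c))
        = -((-1 : Int) ^ (pc c) * PySem.Int.floordiv m ((q * a.getD N 0) * P a N c)) := by
    intro c hc
    have hc' := Finset.mem_range.mp hc
    rw [P_succ_high a N c hc', pc_add_pow N c hc', pow_succ,
      show q * (P a N c * a.getD N 0) = q * a.getD N 0 * P a N c by ring]
    ring
  rw [Finset.sum_congr rfl h1, Finset.sum_congr rfl h2, Finset.sum_neg_distrib]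
  ring

-- B-side recursion on the list, from the front
def hA (m : Int) : List Int → Int → Int
  | [], q => PySem.Int.floordiv m q
  | x :: r, q => hA m r q - hA m r (q * x)

theorem hA_append (m : Int) (l : List Int) (y : Int) : ∀ q,
    hA m (l ++ [y]) q = hA m l q - hA m l (q * y) := by
  induction l with
  | nil => intro q; simp [hA]
  | cons x r ih =>
    intro q
    simp only [List.cons_append, hA, ih]
    rw [show q * x * y = q * y * x by ring]
    ring

theorem hA_take (a : List Int) (m : Int) : ∀ N : Nat, N ≤ a.length → ∀ q,
    hA m (a.take N) q = SA a m N q := by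
  intro N
  induction N with
  | zero =>
    intro _ q
    simp [hA, SA, pc_zero, P]
  | succ N ih =>
    intro hN q
    have hlt : N < a.length := by omega
    have : a.take (N + 1) = a.take N ++ [a[N]] := by
      rw [List.take_add_one]; simp [List.getElem?_eq_getElem hlt]
    rw [this, hA_append, ih (by omega), ih (by omega), SA_succ,
      List.getD_eq_getElem a 0 hlt]

theorem hB_eq_hA (a : List Int) (m : Int) (N : Nat) (hN : N ≤ a.length) :
    ∀ (k i : Nat) (q : Int), N - i = k → hB a m N i q = hA m ((a.take N).drop i) q := by
  intro k
  induction k with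
  | zero =>
    intro i q hk
    rw [hB, if_pos (by omega), List.drop_eq_nil_of_le (by simp; omega)]
    rfl
  | succ k ih =>
    intro i q hk
    have hi : i < N := by omega
    have hi' : i < (a.take N).length := by simp; omega
    have hgt : (a.take N)[i]'hi' = a.getD i 0 := by
      rw [List.getD_eq_getElem a 0 (by omega), List.getElem_take]
    rw [hB, if_neg (by omega), List.drop_eq_getElem_cons hi']
    simp only [hA]
    rw [ih (i+1) q (by omega), ih (i+1) _ (by omega), hgt]
-- A's branch condition is the parity of the popcount
theorem band_bitsoncount (c : Nat) :
    (PySem.Int.band (bitsoncount (c : Int)) 1 ≠ 0) ↔ pc c % 2 = 1 := by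
  unfold bitsoncount pc
  rw [PySem.Int.band_one, show (2 : Int) = ((2 : Nat) : Int) from rfl,
    PySem.Int.mod_natCast]
  omega

theorem neg_one_pow_parity (k : Nat) :
    ((-1 : Int)) ^ k = if k % 2 = 1 then -1 else 1 := by
  by_cases h : k % 2 = 1
  · rw [if_pos h]; exact Odd.neg_one_pow (Nat.odd_iff.mpr h)
  · rw [if_neg h]; exact Even.neg_one_pow (Nat.even_iff.mpr (by omega))

theorem floordiv_one (m : Int) : PySem.Int.floordiv m 1 = m := by
  rw [PySem.Int.floordiv_eq_ediv_of_pos (by norm_num), Int.ediv_one]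

-- A's outer loop accumulates a signed term per counter
theorem fold_diff_gen (f : Int × Int → Nat → Int × Int) (g : Nat → Int)
    (hstep : ∀ st k, (f st k).1 - (f st k).2 = st.1 - st.2 - g k) :
    ∀ (k : Nat) (st : Int × Int),
      ((List.range k).foldl f st).1 - ((List.range k).foldl f st).2
        = st.1 - st.2 - ∑ i ∈ Finset.range k, g i := by
  intro k
  induction k with
  | zero => intro st; simp
  | succ k ih =>
    intro st
    rw [List.range_succ, List.foldl_append, Finset.sum_range_succ]
    simp only [List.foldl_cons, List.foldl_nil]
    rw [hstep, ih]
    ring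

theorem count_spec : Claim_equal_count := by
  intro a m n _ hpre
  obtain ⟨hn, hlen, -⟩ := hpre
  unfold Spec_count count count_alt
  simp only []
  have hstep : ∀ (st : Int × Int) (k : Nat),
      ((fun (st : Int × Int) k =>
        let counter := k + 1
        let p := (List.range n.toNat).foldl (fun p j =>
          if counter &&& (1 <<< j) ≠ 0 then p * a.getD j 0 else p) (1 : Int)
        if PySem.Int.band (bitsoncount (counter : Int)) 1 ≠ 0 then
          (st.1 + PySem.Int.floordiv m p, st.2)
        else
          (st.1, st.2 + PySem.Int.floordiv m p)) st k).1
      - ((fun (st : Int × Int) k =>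
        let counter := k + 1
        let p := (List.range n.toNat).foldl (fun p j =>
          if counter &&& (1 <<< j) ≠ 0 then p * a.getD j 0 else p) (1 : Int)
        if PySem.Int.band (bitsoncount (counter : Int)) 1 ≠ 0 then
          (st.1 + PySem.Int.floordiv m p, st.2)
        else
          (st.1, st.2 + PySem.Int.floordiv m p)) st k).2
      = st.1 - st.2
        - (-1 : Int) ^ (pc (k + 1)) * PySem.Int.floordiv m (P a n.toNat (k + 1)) := by
    intro st k
    show (if PySem.Int.band (bitsoncount ((k + 1 : Nat) : Int)) 1 ≠ 0 then
          (st.1 + PySem.Int.floordiv m (P a n.toNat (k + 1)), st.2)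
        else
          (st.1, st.2 + PySem.Int.floordiv m (P a n.toNat (k + 1)))).1
      - (if PySem.Int.band (bitsoncount ((k + 1 : Nat) : Int)) 1 ≠ 0 then
          (st.1 + PySem.Int.floordiv m (P a n.toNat (k + 1)), st.2)
        else
          (st.1, st.2 + PySem.Int.floordiv m (P a n.toNat (k + 1)))).2
      = st.1 - st.2
        - (-1 : Int) ^ (pc (k + 1)) * PySem.Int.floordiv m (P a n.toNat (k + 1))
    by_cases h : PySem.Int.band (bitsoncount ((k + 1 : Nat) : Int)) 1 ≠ 0
    · rw [if_pos h, neg_one_pow_parity, if_pos ((band_bitsoncount (k + 1)).mp h)]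
      ring
    · rw [if_neg h, neg_one_pow_parity,
        if_neg (fun hc => h ((band_bitsoncount (k + 1)).mpr hc))]
      ring
  rw [fold_diff_gen _
    (fun k => (-1 : Int) ^ (pc (k + 1)) * PySem.Int.floordiv m (P a n.toNat (k + 1)))
    hstep]
  -- index shift: counters 1 .. 2^N - 1 vs 0 .. 2^N - 1
  have hpow : (2 : Nat) ^ n.toNat - 1 + 1 = 2 ^ n.toNat := by
    have : 0 < (2 : Nat) ^ n.toNat := by positivity
    omega
  have hshift := Finset.sum_range_succ'
    (fun c => (-1 : Int) ^ (pc c) * PySem.Int.floordiv m (P a n.toNat c)) (2 ^ n.toNat - 1)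
  rw [hpow] at hshift
  have hzero : (-1 : Int) ^ (pc 0) * PySem.Int.floordiv m (P a n.toNat 0) = m := by
    rw [pc_zero, P_zero_counter, pow_zero, one_mul, floordiv_one]
  -- SA with q = 1 is the unshifted sum
  have hSA : SA a m n.toNat 1
      = ∑ c ∈ Finset.range (2 ^ n.toNat),
          (-1 : Int) ^ (pc c) * PySem.Int.floordiv m (P a n.toNat c) := by
    unfold SA
    exact Finset.sum_congr rfl (fun c _ => by rw [one_mul])
  -- B side
  have hB0 : hB a m n.toNat 0 1 = hA m (a.take n.toNat) 1 := by
    rw [hB_eq_hA a m n.toNat hlen (n.toNat - 0) 0 1 rfl, List.drop_zero]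
  rw [hB0, hA_take a m n.toNat hlen 1, hSA]
  omega
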